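-- pv_equiv track=rewrite | github.com/shantaramk/ipa-analyzer | compare_ipa.py | compare_files
-- ===== SOURCE A (Python) =====
-- def compare_files(before_files, after_files):
--     added_files = {f: d for f, d in after_files.items() if f not in before_files}
--     removed_files = {f: d for f, d in before_files.items() if f not in after_files}
--     modified_files = {
--         f: after_files[f]["size"] - before_files[f]["size"]
--         for f in before_files if f in after_files and after_files[f]["size"] != before_files[f]["size"]
--     }
--     return added_files, removed_files, modified_files
-- ===== SOURCE B (Python) =====
-- def compare_files(before_files, after_files):
--     # Full outer join: first merge both dicts into ONE map f -> (before_entry, after_entry),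
--     # then classify every joined row in a single pass over the join.
--     merged = {}
--     for f, d in before_files.items():
--         merged[f] = (d, None)
--     for f, d in after_files.items():
--         prev = merged.get(f)
--         merged[f] = (prev[0] if prev is not None else None, d)
--     added_files, removed_files, modified_files = {}, {}, {}
--     for f, (b, a) in merged.items():
--         if b is None:
--             added_files[f] = a
--         elif a is None:
--             removed_files[f] = b
--         else:
--             delta = a["size"] - b["size"]
--             if delta != 0:
--                 modified_files[f] = delta
--     return added_files, removed_files, modified_files
-- ===== Notes on version B (the rewrite author's own statement) =====
-- stated objective: alternative
-- what changed: Instead of A's three independent membership-filtered comprehensions over the two dicts, B performs a full outer join: it merges both dicts into a single map f -> (before_entry, after_entry) and then classifies each joined row (added/removed/modified-by-size-delta) in one pass over the join.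
import Mathlib
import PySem

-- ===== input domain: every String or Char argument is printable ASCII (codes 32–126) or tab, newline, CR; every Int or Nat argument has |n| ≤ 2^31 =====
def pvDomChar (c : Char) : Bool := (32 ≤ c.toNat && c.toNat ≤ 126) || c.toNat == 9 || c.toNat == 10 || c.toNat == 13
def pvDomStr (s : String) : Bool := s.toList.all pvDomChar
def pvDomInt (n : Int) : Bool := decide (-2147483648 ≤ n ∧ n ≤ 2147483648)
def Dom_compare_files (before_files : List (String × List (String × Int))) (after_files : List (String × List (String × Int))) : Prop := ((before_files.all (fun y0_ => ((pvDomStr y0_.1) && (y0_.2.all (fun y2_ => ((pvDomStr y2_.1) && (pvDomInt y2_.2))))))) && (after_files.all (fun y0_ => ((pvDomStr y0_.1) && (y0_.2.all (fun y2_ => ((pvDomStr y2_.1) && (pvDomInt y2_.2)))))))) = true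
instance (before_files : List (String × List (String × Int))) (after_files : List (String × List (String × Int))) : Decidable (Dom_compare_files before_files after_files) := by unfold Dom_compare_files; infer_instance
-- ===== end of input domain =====

-- B replaces A's three membership-filtered dict comprehensions by a full outer join:
-- one merged map f -> (before_entry, after_entry), then one classification pass over it
-- (objective: alternative algorithm, same asymptotic cost).

-- ===== PORT A =====
-- A's dict comprehensions become foldl-with-insert over the items; f["size"] is the
-- "size" lookup of the inner dict (total getD form, presence guaranteed by Pre_).
def compare_files (before_files : List (String × List (String × Int))) (after_files : List (String × List (String × Int))) : (List (String × List (String × Int))) × (List (String × List (String × Int))) × (List (String × Int)) :=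
  let before := PySem.Dict.mk before_files
  let after := PySem.Dict.mk after_files
  let added := after_files.foldl
    (fun acc p => if before.contains p.1 then acc else acc.insert p.1 p.2)
    (PySem.Dict.empty : PySem.Dict String (List (String × Int)))
  let removed := before_files.foldl
    (fun acc p => if after.contains p.1 then acc else acc.insert p.1 p.2)
    (PySem.Dict.empty : PySem.Dict String (List (String × Int)))
  let modified := before_files.foldl
    (fun acc p =>
      if after.contains p.1 &&
         !((PySem.Dict.mk (after.getD p.1 [])).getD "size" 0 ==
           (PySem.Dict.mk (before.getD p.1 [])).getD "size" 0)
      then acc.insert p.1 ((PySem.Dict.mk (after.getD p.1 [])).getD "size" 0 -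
                           (PySem.Dict.mk (before.getD p.1 [])).getD "size" 0)
      else acc)
    (PySem.Dict.empty : PySem.Dict String Int)
  (added.items, removed.items, modified.items)

-- ===== PORT B =====
-- Transliteration of Source B: build the outer-join dict 'merged', then classify its rows.
-- The (none, none) match arm is a totality guard only: merged rows always carry at
-- least one 'some'.
def compare_files_alt (before_files : List (String × List (String × Int))) (after_files : List (String × List (String × Int))) : (List (String × List (String × Int))) × (List (String × List (String × Int))) × (List (String × Int)) :=
  let merged0 := before_files.foldl
    (fun acc p => acc.insert p.1 ((some p.2 : Option (List (String × Int))), (none : Option (List (String × Int)))))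
    (PySem.Dict.empty : PySem.Dict String (Option (List (String × Int)) × Option (List (String × Int))))
  let merged := after_files.foldl
    (fun acc p =>
      let prev := acc.get? p.1
      acc.insert p.1 ((match prev with | some pr => pr.1 | none => none), some p.2))
    merged0
  let res := merged.items.foldl
    (fun acc q =>
      match q.2.1, q.2.2 with
      | none, some a => (acc.1.insert q.1 a, acc.2.1, acc.2.2)
      | none, none => acc
      | some b, none => (acc.1, acc.2.1.insert q.1 b, acc.2.2)
      | some b, some a =>
          let delta := (PySem.Dict.mk a).getD "size" 0 - (PySem.Dict.mk b).getD "size" 0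
          if delta != 0 then (acc.1, acc.2.1, acc.2.2.insert q.1 delta) else acc)
    ((PySem.Dict.empty : PySem.Dict String (List (String × Int))),
     (PySem.Dict.empty : PySem.Dict String (List (String × Int))),
     (PySem.Dict.empty : PySem.Dict String Int))
  (res.1.items, res.2.1.items, res.2.2.items)

-- ===== PRECONDITION & SPEC =====
-- Pre_ excludes (a) association lists with duplicate keys, which do not represent any
-- Python dict input, and (b) inputs where a key common to both dicts lacks a "size"
-- entry in either value, on which Python A raises KeyError (no value is returned).
def Pre_compare_files (before_files : List (String × List (String × Int))) (after_files : List (String × List (String × Int))) : Prop :=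
  (before_files.map Prod.fst).Nodup ∧ (after_files.map Prod.fst).Nodup ∧
  ∀ p ∈ before_files, ∀ q ∈ after_files, p.1 = q.1 →
    (PySem.Dict.mk p.2).contains "size" = true ∧ (PySem.Dict.mk q.2).contains "size" = true
instance (before_files : List (String × List (String × Int))) (after_files : List (String × List (String × Int))) : Decidable (Pre_compare_files before_files after_files) := by unfold Pre_compare_files; infer_instance

def pvWitness_compare_files : (List (String × List (String × Int))) × (List (String × List (String × Int))) :=
  ([("a", [("size", 1)]), ("r", [])], [("a", [("size", 3)]), ("n", [("size", 2)])])

def Spec_compare_files (before_files : List (String × List (String × Int))) (after_files : List (String × List (String × Int))) (out : (List (String × List (String × Int))) × (List (String × List (String × Int))) × (List (String × Int))) : Prop := out = compare_files_alt before_files after_files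
instance (before_files : List (String × List (String × Int))) (after_files : List (String × List (String × Int))) (out : (List (String × List (String × Int))) × (List (String × List (String × Int))) × (List (String × Int))) : Decidable (Spec_compare_files before_files after_files out) := by unfold Spec_compare_files; infer_instance

-- ===== CLAIM (what is proved, stated in full; the proofs are below) =====
def Claim_equal_compare_files : Prop := ∀ (before_files : List (String × List (String × Int))) (after_files : List (String × List (String × Int))), Dom_compare_files before_files after_files → Pre_compare_files before_files after_files → Spec_compare_files before_files after_files (compare_files before_files after_files)

-- ===== LEMMAS AND PROOFS =====

-- first-match lookup on a concatenated literal dict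
theorem get?_mk_append {ν : Type} (l1 l2 : List (String × ν)) (k : String) :
    (PySem.Dict.mk (l1 ++ l2)).get? k =
      (match (PySem.Dict.mk l1).get? k with
       | some v => some v
       | none => (PySem.Dict.mk l2).get? k) := by
  induction l1 with
  | nil => rfl
  | cons p t ih =>
    rw [List.cons_append, PySem.Dict.get?_mk_cons, PySem.Dict.get?_mk_cons]
    by_cases h : p.1 == k
    · simp [h]
    · simp only [h, Bool.false_eq_true, if_false]; exact ih

-- lookup in a literal dict is the first matching item
theorem get?_mk_eq_find? {ν : Type} (l : List (String × ν)) (k : String) :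
    (PySem.Dict.mk l).get? k = (l.find? (fun q => q.1 == k)).map Prod.snd := by
  induction l with
  | nil => rfl
  | cons p t ih =>
    rw [PySem.Dict.get?_mk_cons, List.find?_cons]
    by_cases h : p.1 == k
    · simp [h]
    · simp [h, ih]

-- a loop that skips on a condition is the loop over the filtered list
theorem foldl_skip_if_eq_filter {α β : Type} (c : α → Bool) (g : β → α → β) :
    ∀ (l : List α) (init : β),
    l.foldl (fun acc p => if c p then acc else g acc p) init
      = (l.filter (fun p => !c p)).foldl g init := by
  intro l
  induction l with
  | nil => intro init; rfl
  | cons p t ih =>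
    intro init
    by_cases h : c p
    · simp [h, ih]
    · simp [h, ih]

-- the outer-join fold: folding the after items into the joined dict extends the join
theorem join_fold (bfl : List (String × List (String × Int))) (hbf : (bfl.map Prod.fst).Nodup) :
    ∀ (l pre : List (String × List (String × Int))),
    ((pre ++ l).map Prod.fst).Nodup →
    l.foldl
      (fun acc p =>
        acc.insert p.1 ((match acc.get? p.1 with | some pr => pr.1 | none => none), some p.2))
      (PySem.Dict.mk
        (bfl.map (fun p => (p.1, ((some p.2 : Option (List (String × Int))), (PySem.Dict.mk pre).get? p.1)))
         ++ (pre.filter (fun p => !(PySem.Dict.mk bfl).contains p.1)).map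
              (fun p => (p.1, ((none : Option (List (String × Int))), some p.2)))))
    = PySem.Dict.mk
        (bfl.map (fun p => (p.1, ((some p.2 : Option (List (String × Int))), (PySem.Dict.mk (pre ++ l)).get? p.1)))
         ++ ((pre ++ l).filter (fun p => !(PySem.Dict.mk bfl).contains p.1)).map
              (fun p => (p.1, ((none : Option (List (String × Int))), some p.2)))) := by
  intro l
  induction l with
  | nil => intro pre hnd; simp only [List.foldl_nil, List.append_nil]
  | cons p t ih =>
    intro pre hnd
    -- p.1 does not occur among the keys of pre
    have hnd' : (((pre ++ [p]) ++ t).map Prod.fst).Nodup := by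
      simpa [List.append_assoc] using hnd
    have hpnotpre : p.1 ∉ pre.map Prod.fst := by
      rw [List.map_append, List.nodup_append] at hnd
      intro hmem
      exact hnd.2.2 p.1 hmem p.1 (by simp) rfl
    have hprelook : (PySem.Dict.mk pre).get? p.1 = none := by
      rw [PySem.Dict.get?_eq_none_iff_not_mem_keys]
      simpa [PySem.Dict.keys] using hpnotpre
    have hpre'self : (PySem.Dict.mk (pre ++ [p])).get? p.1 = some p.2 := by
      rw [get?_mk_append, hprelook]
      simp [get?_mk_eq_find?]
    have hpre'ne : ∀ k, k ≠ p.1 → (PySem.Dict.mk (pre ++ [p])).get? k = (PySem.Dict.mk pre).get? k := by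
      intro k hk
      rw [get?_mk_append]
      cases hpk : (PySem.Dict.mk pre).get? k with
      | some v => rfl
      | none =>
        have hne : (p.1 == k) = false := by simpa using (Ne.symm hk)
        simp [get?_mk_eq_find?, hne]
    -- lookup of p.1 in the bfl part of the join
    have hL1 : (PySem.Dict.mk (bfl.map (fun q => (q.1, ((some q.2 : Option (List (String × Int))), (PySem.Dict.mk pre).get? q.1))))).get? p.1
        = (bfl.find? (fun q => q.1 == p.1)).map (fun q => ((some q.2 : Option (List (String × Int))), (PySem.Dict.mk pre).get? q.1)) := by
      rw [get?_mk_eq_find?, List.find?_map, Option.map_map]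
      rfl
    have hbflget : (PySem.Dict.mk bfl).get? p.1 = (bfl.find? (fun q => q.1 == p.1)).map Prod.snd :=
      get?_mk_eq_find? bfl p.1
    rw [List.foldl_cons]
    by_cases hcb : (PySem.Dict.mk bfl).contains p.1
    · -- p.1 is a key of before: the insert overwrites the joined row in place
      have hfind : ∃ q0, bfl.find? (fun q => q.1 == p.1) = some q0 := by
        rw [PySem.Dict.contains_eq_isSome_get?, hbflget] at hcb
        cases hf : bfl.find? (fun q => q.1 == p.1) with
        | none => rw [hf] at hcb; simp at hcb
        | some q0 => exact ⟨q0, rfl⟩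
      obtain ⟨q0, hq0⟩ := hfind
      have hq01 : q0.1 = p.1 := by simpa using List.find?_some hq0
      have hq0mem : q0 ∈ bfl := List.mem_of_find?_eq_some hq0
      have hstart : (PySem.Dict.mk (bfl.map (fun q => (q.1, ((some q.2 : Option (List (String × Int))), (PySem.Dict.mk pre).get? q.1)))
            ++ (pre.filter (fun q => !(PySem.Dict.mk bfl).contains q.1)).map
                 (fun q => (q.1, ((none : Option (List (String × Int))), some q.2))))).get? p.1
          = some ((some q0.2 : Option (List (String × Int))), (PySem.Dict.mk pre).get? q0.1) := by
        rw [get?_mk_append, hL1, hq0]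
        rfl
      have hcontains : (PySem.Dict.mk (bfl.map (fun q => (q.1, ((some q.2 : Option (List (String × Int))), (PySem.Dict.mk pre).get? q.1)))
            ++ (pre.filter (fun q => !(PySem.Dict.mk bfl).contains q.1)).map
                 (fun q => (q.1, ((none : Option (List (String × Int))), some q.2))))).contains p.1 = true := by
        rw [PySem.Dict.contains_eq_isSome_get?, hstart]; rfl
      simp only [hstart]
      have hins :
          (PySem.Dict.mk (bfl.map (fun q => (q.1, ((some q.2 : Option (List (String × Int))), (PySem.Dict.mk pre).get? q.1)))
             ++ (pre.filter (fun q => !(PySem.Dict.mk bfl).contains q.1)).map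
                  (fun q => (q.1, ((none : Option (List (String × Int))), some q.2))))).insert p.1
            ((some q0.2 : Option (List (String × Int))), some p.2)
          = PySem.Dict.mk (bfl.map (fun q => (q.1, ((some q.2 : Option (List (String × Int))), (PySem.Dict.mk (pre ++ [p])).get? q.1)))
             ++ (pre.filter (fun q => !(PySem.Dict.mk bfl).contains q.1)).map
                  (fun q => (q.1, ((none : Option (List (String × Int))), some q.2)))) := by
        apply PySem.Dict.ext
        rw [PySem.Dict.items_insert_of_contains _ _ hcontains]
        simp only [List.map_append, List.map_map]
        congr 1
        · apply List.map_congr_left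
          intro q hq
          by_cases hqp : q.1 = p.1
          · have hq2 : (PySem.Dict.mk bfl).get? q.1 = some q.2 :=
              PySem.Dict.get?_of_mem_items _ (by simpa using hq) (by simpa [PySem.Dict.keys] using hbf)
            have : some q.2 = some q0.2 := by
              rw [← hq2, hqp, hbflget, hq0]; rfl
            simp [Function.comp, hqp, hpre'self, this.symm]
          · have hne : (q.1 == p.1) = false := by simpa using hqp
            simp [Function.comp, hne, hpre'ne q.1 hqp]
        · apply List.map_congr_left
          intro q hq
          have hqf : (!(PySem.Dict.mk bfl).contains q.1) = true := (List.mem_filter.mp hq).2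
          have hqp : (q.1 == p.1) = false := by
            by_contra hx
            have : q.1 = p.1 := by simpa using (Bool.not_eq_false _).mp hx
            rw [this, hcb] at hqf; simp at hqf
          simp [Function.comp, hqp]
      rw [hins, show pre ++ p :: t = (pre ++ [p]) ++ t by simp]
      have hfilt : (pre ++ [p]).filter (fun q => !(PySem.Dict.mk bfl).contains q.1)
          = pre.filter (fun q => !(PySem.Dict.mk bfl).contains q.1) := by
        simp only [List.filter_append, List.filter_cons, List.filter_nil, hcb,
          Bool.not_true, Bool.false_eq_true, if_false, List.append_nil]
      rw [← hfilt]
      exact ih (pre ++ [p]) hnd'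
    · -- p.1 is a fresh key: the insert appends a new after-only row
      have hcbf : (PySem.Dict.mk bfl).contains p.1 = false := Bool.eq_false_iff.mpr hcb
      have hnotbfl : p.1 ∉ bfl.map Prod.fst := by
        rw [PySem.Dict.contains_eq_decide_mem_keys] at hcbf
        simpa [PySem.Dict.keys] using hcbf
      have hfind : bfl.find? (fun q => q.1 == p.1) = none := by
        cases hf : bfl.find? (fun q => q.1 == p.1) with
        | none => rfl
        | some q0 =>
          exfalso
          have hq01 : q0.1 = p.1 := by simpa using List.find?_some hf
          exact hnotbfl (hq01 ▸ List.mem_map.mpr ⟨q0, List.mem_of_find?_eq_some hf, rfl⟩)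
      have hstartnone : (PySem.Dict.mk (bfl.map (fun q => (q.1, ((some q.2 : Option (List (String × Int))), (PySem.Dict.mk pre).get? q.1)))
            ++ (pre.filter (fun q => !(PySem.Dict.mk bfl).contains q.1)).map
                 (fun q => (q.1, ((none : Option (List (String × Int))), some q.2))))).get? p.1 = none := by
        rw [get?_mk_append, hL1, hfind]
        show (PySem.Dict.mk _).get? p.1 = none
        rw [PySem.Dict.get?_eq_none_iff_not_mem_keys]
        intro hmem
        simp only [PySem.Dict.keys, List.map_map, List.mem_map] at hmem
        obtain ⟨q, hq, hq1⟩ := hmem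
        exact hpnotpre (List.mem_map.mpr ⟨q, (List.mem_filter.mp hq).1, hq1⟩)
      have hstartcont : (PySem.Dict.mk (bfl.map (fun q => (q.1, ((some q.2 : Option (List (String × Int))), (PySem.Dict.mk pre).get? q.1)))
            ++ (pre.filter (fun q => !(PySem.Dict.mk bfl).contains q.1)).map
                 (fun q => (q.1, ((none : Option (List (String × Int))), some q.2))))).contains p.1 = false := by
        rw [PySem.Dict.contains_eq_isSome_get?, hstartnone]; rfl
      simp only [hstartnone]
      have hins :
          (PySem.Dict.mk (bfl.map (fun q => (q.1, ((some q.2 : Option (List (String × Int))), (PySem.Dict.mk pre).get? q.1)))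
             ++ (pre.filter (fun q => !(PySem.Dict.mk bfl).contains q.1)).map
                  (fun q => (q.1, ((none : Option (List (String × Int))), some q.2))))).insert p.1
            ((none : Option (List (String × Int))), some p.2)
          = PySem.Dict.mk (bfl.map (fun q => (q.1, ((some q.2 : Option (List (String × Int))), (PySem.Dict.mk (pre ++ [p])).get? q.1)))
             ++ ((pre ++ [p]).filter (fun q => !(PySem.Dict.mk bfl).contains q.1)).map
                  (fun q => (q.1, ((none : Option (List (String × Int))), some q.2)))) := by
        apply PySem.Dict.ext
        rw [PySem.Dict.items_insert_of_not_contains _ _ hstartcont]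
        have hmapeq : bfl.map (fun q => (q.1, ((some q.2 : Option (List (String × Int))), (PySem.Dict.mk (pre ++ [p])).get? q.1)))
            = bfl.map (fun q => (q.1, ((some q.2 : Option (List (String × Int))), (PySem.Dict.mk pre).get? q.1))) := by
          apply List.map_congr_left
          intro q hq
          have hqp : q.1 ≠ p.1 := by
            intro h
            exact hnotbfl (h ▸ List.mem_map.mpr ⟨q, hq, rfl⟩)
          rw [hpre'ne q.1 hqp]
        have hfilt : ((pre ++ [p]).filter (fun q => !(PySem.Dict.mk bfl).contains q.1)).map
              (fun q => (q.1, ((none : Option (List (String × Int))), some q.2)))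
            = (pre.filter (fun q => !(PySem.Dict.mk bfl).contains q.1)).map
              (fun q => (q.1, ((none : Option (List (String × Int))), some q.2)))
              ++ [(p.1, ((none : Option (List (String × Int))), some p.2))] := by
          simp only [List.filter_append, List.filter_cons, List.filter_nil, hcbf,
            Bool.not_false, if_true, List.map_append, List.map_cons, List.map_nil]
        show _ ++ _ ++ _ = _
        rw [hmapeq, hfilt, List.append_assoc]
      rw [hins, show pre ++ p :: t = (pre ++ [p]) ++ t by simp]
      exact ih (pre ++ [p]) hnd' 

-- classifying the before part of the join touches only the removed/modified dicts,
-- and produces exactly A's two folds over before_files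
theorem classify_before (afD bfD : PySem.Dict String (List (String × Int))) :
    ∀ (bfl : List (String × List (String × Int))),
    (∀ p ∈ bfl, bfD.getD p.1 [] = p.2) →
    ∀ (a0 : PySem.Dict String (List (String × Int)))
      (r : PySem.Dict String (List (String × Int))) (m : PySem.Dict String Int),
    (bfl.map (fun p => (p.1, ((some p.2 : Option (List (String × Int))), afD.get? p.1)))).foldl
      (fun acc q =>
        match q.2.1, q.2.2 with
        | none, some a => (acc.1.insert q.1 a, acc.2.1, acc.2.2)
        | none, none => acc
        | some b, none => (acc.1, acc.2.1.insert q.1 b, acc.2.2)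
        | some b, some a =>
            let delta := (PySem.Dict.mk a).getD "size" 0 - (PySem.Dict.mk b).getD "size" 0
            if delta != 0 then (acc.1, acc.2.1, acc.2.2.insert q.1 delta) else acc)
      (a0, r, m)
    = (a0,
       bfl.foldl (fun acc p => if afD.contains p.1 then acc else acc.insert p.1 p.2) r,
       bfl.foldl (fun acc p =>
         if afD.contains p.1 &&
            !((PySem.Dict.mk (afD.getD p.1 [])).getD "size" 0 ==
              (PySem.Dict.mk (bfD.getD p.1 [])).getD "size" 0)
         then acc.insert p.1 ((PySem.Dict.mk (afD.getD p.1 [])).getD "size" 0 -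
                              (PySem.Dict.mk (bfD.getD p.1 [])).getD "size" 0)
         else acc) m) := by
  intro bfl
  induction bfl with
  | nil => intro _ a0 r m; rfl
  | cons p t ih =>
    intro h a0 r m
    have hp : bfD.getD p.1 [] = p.2 := h p (List.mem_cons_self ..)
    have ht : ∀ q ∈ t, bfD.getD q.1 [] = q.2 := fun q hq => h q (List.mem_cons_of_mem _ hq)
    simp only [List.map_cons, List.foldl_cons]
    cases hA : afD.get? p.1 with
    | none =>
      have hc : afD.contains p.1 = false := by
        rw [PySem.Dict.contains_eq_isSome_get?, hA]; rfl
      simp only [hc, Bool.false_and, Bool.false_eq_true, if_false]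
      exact ih ht _ _ _
    | some dA =>
      have hc : afD.contains p.1 = true := by
        rw [PySem.Dict.contains_eq_isSome_get?, hA]; rfl
      have had : afD.getD p.1 [] = dA := by
        simp [PySem.Dict.getD_eq_get?_getD, hA]
      by_cases hsz : (PySem.Dict.mk dA).getD "size" 0 = (PySem.Dict.mk p.2).getD "size" 0
      · have h1 : (((PySem.Dict.mk dA).getD "size" 0 - (PySem.Dict.mk p.2).getD "size" 0) != 0) = false := by
          simp [hsz]
        have h2 : ((PySem.Dict.mk (afD.getD p.1 [])).getD "size" 0 ==
                   (PySem.Dict.mk (bfD.getD p.1 [])).getD "size" 0) = true := by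
          simp [had, hp, hsz]
        simp only [h1, Bool.false_eq_true, if_false, hc, if_true, h2, Bool.not_true,
          Bool.and_false]
        exact ih ht _ _ _
      · have h1 : (((PySem.Dict.mk dA).getD "size" 0 - (PySem.Dict.mk p.2).getD "size" 0) != 0) = true := by
          simp [sub_ne_zero, hsz]
        have h2 : ((PySem.Dict.mk (afD.getD p.1 [])).getD "size" 0 ==
                   (PySem.Dict.mk (bfD.getD p.1 [])).getD "size" 0) = false := by
          simp [had, hp, hsz]
        simp only [h1, if_true, hc, h2, Bool.not_false, Bool.and_true]
        simp only [had, hp]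
        exact ih ht _ _ _

-- classifying the after-only part of the join builds exactly the added dict
theorem classify_after (l : List (String × List (String × Int))) :
    ∀ (a0 : PySem.Dict String (List (String × Int)))
      (r : PySem.Dict String (List (String × Int))) (m : PySem.Dict String Int),
    (l.map (fun p => (p.1, ((none : Option (List (String × Int))), some p.2)))).foldl
      (fun acc q =>
        match q.2.1, q.2.2 with
        | none, some a => (acc.1.insert q.1 a, acc.2.1, acc.2.2)
        | none, none => acc
        | some b, none => (acc.1, acc.2.1.insert q.1 b, acc.2.2)
        | some b, some a =>
            let delta := (PySem.Dict.mk a).getD "size" 0 - (PySem.Dict.mk b).getD "size" 0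
            if delta != 0 then (acc.1, acc.2.1, acc.2.2.insert q.1 delta) else acc)
      (a0, r, m)
    = (l.foldl (fun acc p => acc.insert p.1 p.2) a0, r, m) := by
  induction l with
  | nil => intro a0 r m; rfl
  | cons p t ih =>
    intro a0 r m
    simp only [List.map_cons, List.foldl_cons]
    exact ih _ _ _

-- ===== VERDICT (by name: the statement is the Claim_ definition above) =====
theorem compare_files_spec : Claim_equal_compare_files := by
  intro bf af _hDom hPre
  obtain ⟨hndb, hnda, -⟩ := hPre
  unfold Spec_compare_files compare_files compare_files_alt
  have hbfd : ∀ p ∈ bf, (PySem.Dict.mk bf).getD p.1 [] = p.2 := by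
    intro p hp
    rw [PySem.Dict.getD_eq_get?_getD,
      PySem.Dict.get?_of_mem_items _ (by simpa using hp) (by simpa [PySem.Dict.keys] using hndb)]
    rfl
  -- the first loop of B builds the before rows of the join
  have hm0 : bf.foldl
        (fun acc p => acc.insert p.1 ((some p.2 : Option (List (String × Int))), (none : Option (List (String × Int)))))
        (PySem.Dict.empty : PySem.Dict String (Option (List (String × Int)) × Option (List (String × Int))))
      = PySem.Dict.mk
          (bf.map (fun p => (p.1, ((some p.2 : Option (List (String × Int))),
              (PySem.Dict.mk ([] : List (String × List (String × Int)))).get? p.1)))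
           ++ (([] : List (String × List (String × Int))).filter
                 (fun p => !(PySem.Dict.mk bf).contains p.1)).map
                (fun p => (p.1, ((none : Option (List (String × Int))), some p.2)))) := by
    apply PySem.Dict.ext
    rw [PySem.Dict.items_foldl_insert_fresh bf Prod.fst
      (fun a => ((some a.2 : Option (List (String × Int))), (none : Option (List (String × Int)))))
      PySem.Dict.empty (fun a _ => PySem.Dict.contains_empty _) hndb]
    simp [PySem.Dict.empty, get?_mk_eq_find?]
  have hjoin := join_fold bf hndb af [] (by simpa using hnda)
  rw [List.nil_append] at hjoin
  have hclassb := classify_before (PySem.Dict.mk af) (PySem.Dict.mk bf) bf hbfd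
  have hclassa := classify_after (af.filter (fun p => !(PySem.Dict.mk bf).contains p.1))
  have hskip := foldl_skip_if_eq_filter (fun p => (PySem.Dict.mk bf).contains p.1)
    (fun (acc : PySem.Dict String (List (String × Int))) p => acc.insert p.1 p.2) af PySem.Dict.empty
  simp only [hm0, hjoin, List.foldl_append, hclassb, hclassa, hskip]
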